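-- pv_equiv track=rewrite | github.com/timothee-chauvin/trackllm_website | src/trackllm_website/bi/phase_1_stats.py | get_border_inputs
-- ===== SOURCE A (Python) =====
-- def get_border_inputs(
--     endpoint_results: dict[int, dict[str, dict[str, int]]],
-- ) -> list[tuple[int, str]]:
--     """Get all border inputs (token_count, input_token) for an endpoint."""
--     merged: dict[tuple[int, str], dict[str, int]] = {}
--     for token_count, token_results in endpoint_results.items():
--         for token, outputs in token_results.items():
--             key = (token_count, token)
--             if key not in merged:
--                 merged[key] = {}
--             for output, count in outputs.items():
--                 merged[key][output] = merged[key].get(output, 0) + count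
--
--     return [(tc, tok) for (tc, tok), outputs in merged.items() if len(outputs) >= 2]
-- ===== SOURCE B (Python) =====
-- def get_border_inputs(
--     endpoint_results: dict[int, dict[str, dict[str, int]]],
-- ) -> list[tuple[int, str]]:
--     """Get all border inputs (token_count, input_token) for an endpoint."""
--     return [
--         (token_count, token)
--         for token_count, token_results in endpoint_results.items()
--         for token, outputs in token_results.items()
--         if len(outputs) >= 2
--     ]
-- ===== Notes on version B (the rewrite author's own statement) =====
-- stated objective: simpler
-- what changed: Drops the intermediate `merged` accumulation dict entirely: since each (token_count, token) key occurs exactly once in a dict-of-dicts input, B tests len(outputs) >= 2 in a single direct nested comprehension instead of building a merge table and then filtering it.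
import Mathlib
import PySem

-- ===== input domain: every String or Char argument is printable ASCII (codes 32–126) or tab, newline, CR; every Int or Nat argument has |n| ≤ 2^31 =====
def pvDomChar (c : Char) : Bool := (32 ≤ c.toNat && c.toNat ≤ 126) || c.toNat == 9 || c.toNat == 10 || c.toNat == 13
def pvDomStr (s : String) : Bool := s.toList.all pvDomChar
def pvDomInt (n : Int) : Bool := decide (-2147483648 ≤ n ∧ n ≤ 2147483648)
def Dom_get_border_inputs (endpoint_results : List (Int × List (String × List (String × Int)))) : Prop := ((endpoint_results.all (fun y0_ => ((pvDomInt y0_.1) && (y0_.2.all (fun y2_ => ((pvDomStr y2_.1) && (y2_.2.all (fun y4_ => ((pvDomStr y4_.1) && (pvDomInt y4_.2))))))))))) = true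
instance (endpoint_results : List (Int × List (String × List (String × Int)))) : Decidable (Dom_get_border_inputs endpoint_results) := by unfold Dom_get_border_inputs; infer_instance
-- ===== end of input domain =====

-- B drops A's intermediate `merged` accumulation dict and emits (token_count, token) in one
-- direct nested pass (objective: simpler); equivalent because each key occurs once in a dict input.

-- ===== PORT A =====
-- inner loop body: merged[key][output] = merged[key].get(output, 0) + count
-- (ported as Dict.modify; the default is never consulted since key was just ensured present)
def pyA_outStep (key : Int × String) (merged : PySem.Dict (Int × String) (PySem.Dict String Int))
    (r : String × Int) : PySem.Dict (Int × String) (PySem.Dict String Int) :=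
  merged.modify key PySem.Dict.empty (fun d => d.insert r.1 (d.getD r.1 0 + r.2))

-- body of "for token, outputs in token_results.items():"
def pyA_tokStep (token_count : Int) (merged : PySem.Dict (Int × String) (PySem.Dict String Int))
    (q : String × List (String × Int)) : PySem.Dict (Int × String) (PySem.Dict String Int) :=
  q.2.foldl (pyA_outStep (token_count, q.1))
    (if merged.contains (token_count, q.1) then merged
     else merged.insert (token_count, q.1) PySem.Dict.empty)

def get_border_inputs (endpoint_results : List (Int × List (String × List (String × Int)))) : List (Int × String) :=
  ((endpoint_results.foldl
      (fun merged p => p.2.foldl (pyA_tokStep p.1) merged) PySem.Dict.empty).items.filter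
    (fun kv => decide (2 ≤ kv.2.size))).map (fun kv => kv.1)

-- ===== PORT B =====
def get_border_inputs_alt (endpoint_results : List (Int × List (String × List (String × Int)))) : List (Int × String) :=
  endpoint_results.flatMap (fun p =>
    (p.2.filter (fun q => decide (2 ≤ q.2.length))).map (fun q => (p.1, q.1)))

-- ===== PRECONDITION & SPEC =====
-- Pre_ restricts the association lists to distinct keys at every level: exactly the lists that
-- represent Python dicts (a Python dict argument can never have duplicate keys), so no input
-- A's Python returns on is excluded.
def Pre_get_border_inputs (endpoint_results : List (Int × List (String × List (String × Int)))) : Prop :=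
  (endpoint_results.map (·.1)).Nodup ∧
    ∀ p ∈ endpoint_results, (p.2.map (·.1)).Nodup ∧ ∀ q ∈ p.2, (q.2.map (·.1)).Nodup
instance (endpoint_results : List (Int × List (String × List (String × Int)))) : Decidable (Pre_get_border_inputs endpoint_results) := by unfold Pre_get_border_inputs; infer_instance

def pvWitness_get_border_inputs : (List (Int × List (String × List (String × Int)))) :=
  [(5, [("a", [("x", 1), ("y", 2)]), ("b", [("x", 3)])]), (7, [("a", [("z", 1)])])]

def Spec_get_border_inputs (endpoint_results : List (Int × List (String × List (String × Int)))) (out : List (Int × String)) : Prop := out = get_border_inputs_alt endpoint_results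
instance (endpoint_results : List (Int × List (String × List (String × Int)))) (out : List (Int × String)) : Decidable (Spec_get_border_inputs endpoint_results out) := by unfold Spec_get_border_inputs; infer_instance

-- ===== CLAIM (what is proved, stated in full; the proofs are below) =====
def Claim_equal_get_border_inputs : Prop := ∀ (endpoint_results : List (Int × List (String × List (String × Int)))), Dom_get_border_inputs endpoint_results → Pre_get_border_inputs endpoint_results → Spec_get_border_inputs endpoint_results (get_border_inputs endpoint_results)

-- ===== LEMMAS AND PROOFS =====

-- the inner dict A builds for one (key, outs) group
def innerD (outs : List (String × Int)) : PySem.Dict String Int :=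
  outs.foldl (fun d r => d.insert r.1 (d.getD r.1 0 + r.2)) PySem.Dict.empty

-- the outputs loop only rewrites the entry at `key`
theorem outLoop_insert (key : Int × String) (m : PySem.Dict (Int × String) (PySem.Dict String Int))
    (outs : List (String × Int)) (d : PySem.Dict String Int) :
    outs.foldl (pyA_outStep key) (m.insert key d)
      = m.insert key (outs.foldl (fun d r => d.insert r.1 (d.getD r.1 0 + r.2)) d) := by
  induction outs generalizing d with
  | nil => rfl
  | cons r outs ih =>
      simp only [List.foldl_cons, pyA_outStep]
      rw [show (m.insert key d).modify key PySem.Dict.empty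
            (fun d => d.insert r.1 (d.getD r.1 0 + r.2))
          = m.insert key (d.insert r.1 (d.getD r.1 0 + r.2)) by
        simp [PySem.Dict.modify, PySem.Dict.getD_insert_self, PySem.Dict.insert_insert_self]]
      exact ih _

-- one token-loop iteration on a fresh key appends (key, innerD outs)
theorem tokStep_fresh (tc : Int) (m : PySem.Dict (Int × String) (PySem.Dict String Int))
    (q : String × List (String × Int)) (h : m.contains (tc, q.1) = false) :
    pyA_tokStep tc m q = m.insert (tc, q.1) (innerD q.2) := by
  unfold pyA_tokStep innerD
  rw [h, if_neg (by simp)]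
  exact outLoop_insert (tc, q.1) m q.2 PySem.Dict.empty

-- the token loop never touches keys with another token_count
theorem tokStep_contains_ne (tc : Int) (m : PySem.Dict (Int × String) (PySem.Dict String Int))
    (q : String × List (String × Int)) (k : Int × String) (h : k.1 ≠ tc) :
    (pyA_tokStep tc m q).contains k = m.contains k := by
  have hne : (k == (tc, q.1)) = false :=
    beq_eq_false_iff_ne.mpr (fun he => h (by rw [he]))
  unfold pyA_tokStep
  have base : ∀ m' : PySem.Dict (Int × String) (PySem.Dict String Int),
      m'.contains k = m.contains k →
      (q.2.foldl (pyA_outStep (tc, q.1)) m').contains k = m.contains k := by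
    intro m' hm'
    induction q.2 generalizing m' with
    | nil => exact hm'
    | cons r rs ih =>
        simp only [List.foldl_cons]
        refine ih _ ?_
        simp [pyA_outStep, PySem.Dict.contains_modify, hne, hm']
  cases hc : m.contains (tc, q.1) with
  | true =>
      rw [if_pos rfl]
      exact base m rfl
  | false =>
      rw [if_neg (by simp)]
      refine base _ ?_
      simp [PySem.Dict.contains_insert, hne]

theorem tokLoop_contains_ne (tc : Int) (m : PySem.Dict (Int × String) (PySem.Dict String Int))
    (ts : List (String × List (String × Int))) (k : Int × String) (h : k.1 ≠ tc) :
    (ts.foldl (pyA_tokStep tc) m).contains k = m.contains k := by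
  induction ts generalizing m with
  | nil => rfl
  | cons q ts ih => simp only [List.foldl_cons]; rw [ih, tokStep_contains_ne tc m q k h]

-- the whole token loop over fresh, distinct tokens appends its groups
theorem tokLoop_items (tc : Int) (m : PySem.Dict (Int × String) (PySem.Dict String Int))
    (ts : List (String × List (String × Int)))
    (hnd : (ts.map (·.1)).Nodup) (hfresh : ∀ q ∈ ts, m.contains (tc, q.1) = false) :
    (ts.foldl (pyA_tokStep tc) m).items
      = m.items ++ ts.map (fun q => ((tc, q.1), innerD q.2)) := by
  induction ts generalizing m with
  | nil => simp
  | cons q ts ih =>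
      simp only [List.foldl_cons]
      rw [tokStep_fresh tc m q (hfresh q (List.mem_cons_self))]
      rw [ih (m.insert (tc, q.1) (innerD q.2)) (by simpa using hnd.of_cons)]
      · rw [PySem.Dict.items_insert_of_not_contains _ _ (hfresh q List.mem_cons_self)]
        simp
      · intro q' hq'
        rw [PySem.Dict.contains_insert]
        have h1 : q'.1 ≠ q.1 := by
          simp only [List.map_cons, List.nodup_cons] at hnd
          intro he; exact hnd.1 (he ▸ List.mem_map_of_mem hq')
        have : ((tc, q'.1) == (tc, q.1)) = false := by
          simp [h1]
        rw [this, hfresh q' (List.mem_cons_of_mem _ hq')]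
        rfl

-- the full accumulation: merged.items is the flattened group list
theorem merged_items (er : List (Int × List (String × List (String × Int))))
    (m : PySem.Dict (Int × String) (PySem.Dict String Int))
    (hnd : (er.map (·.1)).Nodup)
    (hin : ∀ p ∈ er, (p.2.map (·.1)).Nodup)
    (hfresh : ∀ p ∈ er, ∀ q ∈ p.2, m.contains (p.1, q.1) = false) :
    (er.foldl (fun merged p => p.2.foldl (pyA_tokStep p.1) merged) m).items
      = m.items ++ er.flatMap (fun p => p.2.map (fun q => ((p.1, q.1), innerD q.2))) := by
  induction er generalizing m with
  | nil => simp
  | cons p er ih =>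
      simp only [List.foldl_cons]
      rw [ih _ (by simpa using hnd.of_cons) (fun p' hp' => hin p' (List.mem_cons_of_mem _ hp'))]
      · rw [tokLoop_items p.1 m p.2 (hin p List.mem_cons_self)
            (fun q hq => hfresh p List.mem_cons_self q hq)]
        simp
      · intro p' hp' q' hq'
        rw [tokLoop_contains_ne]
        · exact hfresh p' (List.mem_cons_of_mem _ hp') q' hq'
        · simp only [List.map_cons, List.nodup_cons] at hnd
          intro he; exact hnd.1 (he ▸ List.mem_map_of_mem hp')

-- under distinct output keys, A's merged inner dict has size = number of outputs
theorem size_innerD (outs : List (String × Int)) (hnd : (outs.map (·.1)).Nodup) :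
    (innerD outs).size = outs.length := by
  have hkeys : (innerD outs).keys = outs.map (·.1) := by
    rw [innerD, PySem.Dict.keys_foldl_insert_key outs (·.1) _ _, PySem.Dict.keys_empty,
      PySem.Set.update_nil_left, PySem.Set.ofList_eq_self_of_nodup _ hnd]
  have : (innerD outs).size = (innerD outs).keys.length := by
    simp [PySem.Dict.size, PySem.Dict.keys]
  rw [this, hkeys, List.length_map]

-- the merged item list, filtered and projected, is exactly B's one-pass result
theorem flat_eq (er : List (Int × List (String × List (String × Int))))
    (hin : ∀ p ∈ er, ∀ q ∈ p.2, (q.2.map (·.1)).Nodup) :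
    ((er.flatMap (fun p => p.2.map (fun q => ((p.1, q.1), innerD q.2)))).filter
        (fun kv => decide (2 ≤ kv.2.size))).map (fun kv => kv.1)
      = er.flatMap (fun p =>
          (p.2.filter (fun q => decide (2 ≤ q.2.length))).map (fun q => (p.1, q.1))) := by
  induction er with
  | nil => simp
  | cons p er ih =>
      simp only [List.flatMap_cons, List.filter_append, List.map_append]
      congr 1
      · rw [List.filter_map, List.map_map]
        rw [List.filter_congr (fun q hq => by
          simp only [Function.comp_apply]
          rw [size_innerD q.2 (hin p List.mem_cons_self q hq)])]
        simp [Function.comp]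
      · exact ih (fun p' hp' => hin p' (List.mem_cons_of_mem _ hp'))

-- ===== VERDICT (by name: the statement is the Claim_ definition above) =====
theorem get_border_inputs_spec : Claim_equal_get_border_inputs := by
  intro er _ hpre
  unfold Spec_get_border_inputs get_border_inputs get_border_inputs_alt
  rw [merged_items er PySem.Dict.empty hpre.1 (fun p hp => (hpre.2 p hp).1)
      (fun p _ q _ => by simp [PySem.Dict.contains_empty])]
  rw [show (PySem.Dict.empty : PySem.Dict (Int × String) (PySem.Dict String Int)).items = []
        from rfl, List.nil_append]
  exact flat_eq er (fun p hp => (hpre.2 p hp).2)
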